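-- pv_equiv track=rewrite | github.com/adrian325/Python_tasks | task2.py | find_start_index
-- ===== SOURCE A (Python) =====
-- def find_start_index(spell):
--     fe_counter = 0
--     start_index = 0
--     for i in range(1, len(spell)):
--         if spell[i - 1:i + 1] == 'fe':
--             start_index = i - 1
--             fe_counter += 1
--     if fe_counter == 1:
--         return start_index
--     else:
--         return -1
-- ===== SOURCE B (Python) =====
-- def find_start_index(spell):
--     head, sep, tail = spell.partition('fe')
--     if sep and 'fe' not in tail:
--         return len(head)
--     return -1
-- ===== Notes on version B (the rewrite author's own statement) =====
-- stated objective: simpler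
-- what changed: B has no loop and keeps no state: it splits the string once with str.partition('fe') and returns the head's length exactly when the separator was found and the tail contains no further occurrence, instead of A's index loop that slices two characters at every position while maintaining a counter and the last match index; correct because the pattern cannot overlap itself, so the first occurrence is the unique one iff none follows it.
import Mathlib
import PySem

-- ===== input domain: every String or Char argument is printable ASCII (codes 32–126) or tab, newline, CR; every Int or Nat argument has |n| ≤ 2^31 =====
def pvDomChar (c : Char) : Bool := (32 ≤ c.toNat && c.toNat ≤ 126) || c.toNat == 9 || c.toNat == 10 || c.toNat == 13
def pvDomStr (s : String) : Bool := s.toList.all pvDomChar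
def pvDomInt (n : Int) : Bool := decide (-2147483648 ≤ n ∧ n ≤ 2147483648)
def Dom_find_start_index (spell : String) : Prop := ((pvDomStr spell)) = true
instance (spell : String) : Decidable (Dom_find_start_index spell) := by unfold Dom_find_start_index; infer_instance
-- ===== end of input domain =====

-- B replaces A's scanning loop (counter + last-match index) by str.partition('fe') plus a
-- membership test on the remainder; objective: simpler (no loop of its own, no state).

-- ===== PORT A =====
def find_start_index (spell : String) : Int :=
  let st :=
    (PySem.List.pyRange 1 (PySem.Str.len spell) 1).foldl
      (fun (s : Int × Int) i =>
        if PySem.Str.slice spell (some (i - 1)) (some (i + 1)) = "fe" then (s.1 + 1, i - 1) else s)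
      (0, 0)
  if st.1 = 1 then st.2 else -1

-- ===== PORT B =====
-- Source B: head, sep, tail = spell.partition('fe'); partition locates the FIRST occurrence
-- (ported as PySem.Chars.find), sep is empty iff find = -1, head/tail are take/drop around it;
-- 'fe' in tail is PySem.Chars.isIn.
def find_start_index_alt (spell : String) : Int :=
  let cs := spell.toList
  let k := PySem.Chars.find cs ['f', 'e']
  if k = -1 then -1
  else if PySem.Chars.isIn ['f', 'e'] (cs.drop (k.toNat + 2)) then -1
  else ((cs.take k.toNat).length : Int)

-- ===== PRECONDITION & SPEC =====
def Spec_find_start_index (spell : String) (out : Int) : Prop := out = find_start_index_alt spell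
instance (spell : String) (out : Int) : Decidable (Spec_find_start_index spell out) := by unfold Spec_find_start_index; infer_instance

-- ===== CLAIM (what is proved, stated in full; the proofs are below) =====
def Claim_equal_find_start_index : Prop := ∀ (spell : String), Dom_find_start_index spell → Spec_find_start_index spell (find_start_index spell)

-- ===== LEMMAS AND PROOFS =====

-- the two-character match predicate at a Nat position of the character list
def pvPm (cs : List Char) (k : Nat) : Bool := (cs[k]? == some 'f') && (cs[k + 1]? == some 'e')

-- the list of all match positions, in increasing order
def pvM (cs : List Char) : List Nat := (List.range cs.length).filter (pvPm cs)

lemma mem_pvM (cs : List Char) (k : Nat) : k ∈ pvM cs ↔ pvPm cs k = true := by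
  unfold pvM
  rw [List.mem_filter, List.mem_range]
  constructor
  · exact fun h => h.2
  · intro h
    refine ⟨?_, h⟩
    unfold pvPm at h
    simp at h
    exact (List.getElem?_eq_some_iff.1 h.1).1

lemma pvM_sorted (cs : List Char) : (pvM cs).Pairwise (· < ·) :=
  (List.pairwise_lt_range).filter _

-- two-character prefix, characterised by the first two elements
lemma pvPrefix_pair (l : List Char) :
    (['f', 'e'] <+: l) ↔ (l[0]? = some 'f' ∧ l[1]? = some 'e') := by
  match l with
  | [] => simp
  | [x] => simp [List.IsPrefix]
  | x :: y :: t =>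
    constructor
    · rintro ⟨r, hr⟩
      simp at hr ⊢
      exact ⟨hr.1.symm, hr.2.1.symm⟩
    · rintro ⟨h1, h2⟩
      simp at h1 h2
      exact ⟨t, by simp [h1, h2]⟩

lemma pvPm_iff_prefix_drop (cs : List Char) (j : Nat) :
    pvPm cs j = true ↔ ['f', 'e'] <+: cs.drop j := by
  rw [pvPrefix_pair]
  unfold pvPm
  simp [List.getElem?_drop]

lemma pvInfix_iff_exists_pm (cs : List Char) :
    (['f', 'e'] <:+: cs) ↔ ∃ j, pvPm cs j = true := by
  constructor
  · rintro ⟨s, t, rfl⟩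
    refine ⟨s.length, (pvPm_iff_prefix_drop _ _).2 ?_⟩
    rw [List.append_assoc, List.drop_left]
    exact ⟨t, rfl⟩
  · rintro ⟨j, hj⟩
    exact ((pvPm_iff_prefix_drop cs j).1 hj).isInfix.trans (List.drop_suffix j cs).isInfix

-- A's loop, reduced: count = (pvM cs).length, last start index = getLastD of pvM
lemma fold_filter (p : Nat → Bool) (f : Nat → Int) :
    ∀ (l : List Nat) (c s : Int),
      (l.foldl (fun st k => if p k then (st.1 + 1, f k) else st) (c, s))
        = (c + ((l.filter p).length : Int), ((l.filter p).map f).getLastD s) := by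
  intro l
  induction l with
  | nil => intro c s; simp
  | cons h t ih =>
    intro c s
    by_cases hp : p h = true
    · rw [List.foldl_cons, if_pos hp, ih, List.filter_cons_of_pos hp, List.map_cons,
        List.getLastD_cons, List.length_cons]
      exact Prod.ext (by push_cast; ring) rfl
    · rw [List.foldl_cons, if_neg hp, ih, List.filter_cons_of_neg (by simpa using hp)]

lemma take_two_eq_pair (l : List Char) (a b : Char) :
    (l.take 2 = [a, b]) ↔ (l[0]? = some a ∧ l[1]? = some b) := by
  match l with
  | [] => simp
  | [x] => simp
  | x :: y :: t => simp [List.take]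

-- A's slice test at position k equals the match predicate
lemma slice_cond (spell : String) (k : Nat) :
    (PySem.Str.slice spell (some ((k : Int))) (some ((k : Int) + 2)) = "fe")
      ↔ pvPm spell.toList k = true := by
  have h2 : ((k : Int) + 2) = ((k : Int) + ((2 : Nat) : Int)) := by norm_num
  unfold pvPm
  constructor
  · intro h
    have := congrArg String.toList h
    simp [PySem.Str.toList_slice, h2, PySem.List.slice_natCast_add] at this
    rw [take_two_eq_pair] at this
    simp [List.getElem?_drop] at this ⊢
    exact this
  · intro h
    simp at h
    have : (spell.toList.drop k).take 2 = ['f', 'e'] := by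
      rw [take_two_eq_pair]
      simp [List.getElem?_drop]
      exact h
    have h3 : (PySem.Str.slice spell (some ((k : Int))) (some ((k : Int) + 2))).toList
        = ("fe" : String).toList := by
      simp [PySem.Str.toList_slice, h2, PySem.List.slice_natCast_add, this]
    exact String.toList_inj.1 h3

-- A's result through pvM
lemma portA_eq (spell : String) :
    find_start_index spell
      = (if ((pvM spell.toList).length : Int) = 1
         then ((pvM spell.toList).map (fun (k : Nat) => (k : Int))).getLastD 0 else -1) := by
  unfold find_start_index
  rw [PySem.List.pyRange_one 1 (PySem.Str.len spell)]
  simp only [List.foldl_map]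
  have hf : (fun (st : Int × Int) (k : Nat) =>
        if PySem.Str.slice spell (some ((1 : Int) + ↑k - 1)) (some ((1 : Int) + ↑k + 1)) = "fe"
        then (st.1 + 1, (1 : Int) + ↑k - 1) else st)
      = (fun (st : Int × Int) (k : Nat) =>
        if pvPm spell.toList k then (st.1 + 1, (↑k : Int)) else st) := by
    funext st k
    have e1 : (1 : Int) + ↑k - 1 = (↑k : Int) := by ring
    have e2 : (1 : Int) + ↑k + 1 = (↑k : Int) + 2 := by ring
    rw [e1, e2]
    by_cases hm : pvPm spell.toList k = true
    · rw [if_pos ((slice_cond spell k).2 hm), if_pos hm]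
    · rw [if_neg (fun hc => hm ((slice_cond spell k).1 hc)), if_neg hm]
  rw [hf, fold_filter (pvPm spell.toList) (fun (k : Nat) => (↑k : Int))]
  have hM : (List.range (PySem.Str.len spell - 1).toNat).filter (pvPm spell.toList)
      = pvM spell.toList := by
    unfold pvM
    have hlen : PySem.Str.len spell = (spell.toList.length : Int) := by
      simp [PySem.Str.len_eq]
    have hl : spell.toList.length = spell.length := by simp
    rw [hlen]
    rcases Nat.eq_zero_or_pos spell.toList.length with h0 | hpos
    · simp [h0]
    · have hts : ((spell.toList.length : Int) - 1).toNat = spell.toList.length - 1 := by omega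
      rw [hts]
      have hsplit : List.range spell.toList.length
          = List.range (spell.toList.length - 1) ++ [spell.toList.length - 1] := by
        have := List.range_succ (n := spell.toList.length - 1)
        rw [← this]
        congr 1
        omega
      rw [hsplit, List.filter_append]
      have hlast : pvPm spell.toList (spell.length - 1) = false := by
        unfold pvPm
        have hn : spell.toList[spell.length - 1 + 1]? = none := by
          rw [List.getElem?_eq_none_iff]
          omega
        simp [hn]
      simp [hlast]
  rw [hM]
  simp only [zero_add]

-- B's result through pvM
lemma portB_eq (spell : String) :
    find_start_index_alt spell
      = (match (pvM spell.toList).head? with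
         | none => -1
         | some h => if (pvM spell.toList).length = 1 then (h : Int) else -1) := by
  unfold find_start_index_alt
  set cs := spell.toList with hcs
  by_cases hfind : PySem.Chars.find cs ['f', 'e'] = -1
  · -- no occurrence: pvM is empty
    have hninf : ¬ (['f', 'e'] <:+: cs) := by
      have := (PySem.Chars.find_eq_neg_one_iff (s := cs) (sub := ['f', 'e'])).1 hfind
      exact this
    have hM : pvM cs = [] := by
      rcases h : pvM cs with _ | ⟨a, t⟩
      · rfl
      · exfalso
        have ha : pvPm cs a = true := (mem_pvM cs a).1 (by rw [h]; exact List.mem_cons_self)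
        exact hninf ((pvInfix_iff_exists_pm cs).2 ⟨a, ha⟩)
    simp [hfind, hM]
  · -- first occurrence at k
    have hspec := PySem.Chars.findFrom_natCast_spec (s := cs) (sub := ['f', 'e']) (k := 0)
      (by omega) (by simpa [PySem.Chars.findFrom_zero] using hfind)
    simp only [Nat.cast_zero, PySem.Chars.findFrom_zero] at hspec
    obtain ⟨hle, hpref, hmin⟩ := hspec
    set f := (PySem.Chars.find cs ['f', 'e']).toNat with hf
    have hpmf : pvPm cs f = true := (pvPm_iff_prefix_drop cs f).2 (by simpa using hpref)
    -- head of pvM is f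
    have hhead : (pvM cs).head? = some f := by
      have hmem : f ∈ pvM cs := (mem_pvM cs f).2 hpmf
      rcases h : pvM cs with _ | ⟨a, t⟩
      · rw [h] at hmem; simp at hmem
      · have hsort := pvM_sorted cs
        rw [h] at hsort hmem
        have ha : pvPm cs a = true := (mem_pvM cs a).1 (by rw [h]; exact List.mem_cons_self)
        have haf : f ≤ a := by
          by_contra hlt
          exact (hmin a (by omega) (by omega)) ((pvPm_iff_prefix_drop cs a).1 ha)
        rcases List.mem_cons.1 hmem with rfl | hmem'
        · rfl
        · have : a < f := (List.pairwise_cons.1 hsort).1 f hmem'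
          omega
    -- the tail test decides length = 1
    have htail : PySem.Chars.isIn ['f', 'e'] (cs.drop (f + 2)) = true
        ↔ 2 ≤ (pvM cs).length := by
      rw [PySem.Chars.isIn_iff_infix, pvInfix_iff_exists_pm]
      constructor
      · rintro ⟨j, hj⟩
        have hj' : pvPm cs (f + 2 + j) = true := by
          unfold pvPm at hj ⊢
          simpa [List.getElem?_drop, Nat.add_assoc] using hj
        have hmem2 : f + 2 + j ∈ pvM cs := (mem_pvM cs _).2 hj'
        have hmemf : f ∈ pvM cs := (mem_pvM cs f).2 hpmf
        rcases h : pvM cs with _ | ⟨a, t⟩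
        · rw [h] at hmemf; simp at hmemf
        · rcases ht : t with _ | ⟨b, t'⟩
          · exfalso
            rw [h, ht] at hmemf hmem2
            simp at hmemf hmem2
            omega
          · simp
      · intro hlen2
        rcases h : pvM cs with _ | ⟨a, t⟩
        · rw [h] at hlen2; simp at hlen2
        · rcases ht : t with _ | ⟨b, t'⟩
          · rw [h, ht] at hlen2; simp at hlen2
          · have hha : a = f := by
              have := hhead; rw [h] at this; simpa using this
            have hb : pvPm cs b = true := (mem_pvM cs b).1 (by rw [h, ht]; simp)
            have hab : a < b := by
              have hsort := pvM_sorted cs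
              rw [h, ht] at hsort
              exact (List.pairwise_cons.1 hsort).1 b (by simp)
            -- non-overlap: b ≠ f + 1 since cs[f+1] = 'e' but pvPm b needs cs[b] = 'f'
            have hbne : b ≠ f + 1 := by
              intro hbe
              unfold pvPm at hpmf hb
              simp at hpmf hb
              rw [hbe] at hb
              rw [hpmf.2] at hb
              simpa using hb.1
            have hge : f + 2 ≤ b := by omega
            refine ⟨b - (f + 2), ?_⟩
            unfold pvPm at hb ⊢
            simp only [List.getElem?_drop]
            rw [(by omega : f + 2 + (b - (f + 2)) = b), (by omega : f + 2 + (b - (f + 2) + 1) = b + 1)]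
            exact hb
    have hflen : f < cs.length := by
      have h' := hpmf
      unfold pvPm at h'
      simp at h'
      exact (List.getElem?_eq_some_iff.1 h'.1).1
    rcases h : pvM cs with _ | ⟨a, t⟩
    · exfalso
      have := (mem_pvM cs f).2 hpmf
      rw [h] at this; simp at this
    · have hha : a = f := by
        have := hhead; rw [h] at this; simpa using this
      subst hha
      rcases ht : t with _ | ⟨b, t'⟩
      · have hnotin : PySem.Chars.isIn ['f', 'e'] (cs.drop (f + 2)) = false := by
          rcases hbool : PySem.Chars.isIn ['f', 'e'] (cs.drop (f + 2)) with _ | _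
          · rfl
          · exfalso
            have := htail.1 hbool
            rw [h, ht] at this; simp at this
        rw [if_neg hfind, hnotin, ← hf]
        simp
        all_goals omega
      · have hin : PySem.Chars.isIn ['f', 'e'] (cs.drop (f + 2)) = true := by
          apply htail.2
          rw [h, ht]; simp
        rw [if_neg hfind, hin]
        simp

-- ===== VERDICT (by name: the statement is the Claim_ definition above) =====
theorem find_start_index_spec : Claim_equal_find_start_index := by
  intro spell _
  unfold Spec_find_start_index
  rw [portA_eq, portB_eq]
  rcases h : pvM spell.toList with _ | ⟨a, t⟩
  · simp
  · rcases ht : t with _ | ⟨b, t'⟩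
    · simp
    · rw [if_neg (by simp; omega)]
      simp
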